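-- pv_equiv track=rewrite | github.com/developers-everyday/novareel | services/backend/app/services/pipeline.py | _select_cleanest_image
-- ===== SOURCE A (Python) =====
-- def _select_cleanest_image(image_analysis: list[dict]) -> str | None:
--   """Pick the product image with the least text/branding from analysis.
--
--   Scans image_analysis descriptions for keywords that indicate overlaid text,
--   logos, or branding.  Returns the asset_id of the image whose description
--   contains the fewest such indicators — i.e. the "cleanest" product shot
--   best suited as a reference for Nova Canvas.
--   """
--   if not image_analysis:
--     return None
--
--   text_indicators = [
--     'text', 'logo', 'label', 'branding', 'watermark', 'lettering',
--     'typography', 'caption', 'tagline', 'slogan', 'brand name',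
--   ]
--
--   scored: list[tuple[int, str]] = []
--   for info in image_analysis:
--     desc = (info.get('description') or '').lower()
--     penalty = sum(1 for kw in text_indicators if kw in desc)
--     scored.append((penalty, info['asset_id']))
--
--   scored.sort(key=lambda x: x[0])
--   return scored[0][1] if scored else None
-- ===== SOURCE B (Python) =====
-- def _select_cleanest_image(image_analysis: list[dict]) -> str | None:
--   """Single pass: keep the running best (lowest-penalty) image; no scored
--   list, no sort.  Strict '<' keeps the first minimum, like a stable sort."""
--   if not image_analysis:
--     return None
--
--   text_indicators = [
--     'text', 'logo', 'label', 'branding', 'watermark', 'lettering',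
--     'typography', 'caption', 'tagline', 'slogan', 'brand name',
--   ]
--
--   best_penalty = None
--   best_id = None
--   for info in image_analysis:
--     desc = (info.get('description') or '').lower()
--     penalty = sum(1 for kw in text_indicators if kw in desc)
--     asset_id = info['asset_id']
--     if best_penalty is None or penalty < best_penalty:
--       best_penalty = penalty
--       best_id = asset_id
--   return best_id
-- ===== Notes on version B (the rewrite author's own statement) =====
-- stated objective: simpler
-- what changed: Replaced build-a-scored-list + stable sort + take-first with a single running-minimum pass (strict '<' preserves the first-of-ties winner); no intermediate list, no sort.
import Mathlib
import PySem

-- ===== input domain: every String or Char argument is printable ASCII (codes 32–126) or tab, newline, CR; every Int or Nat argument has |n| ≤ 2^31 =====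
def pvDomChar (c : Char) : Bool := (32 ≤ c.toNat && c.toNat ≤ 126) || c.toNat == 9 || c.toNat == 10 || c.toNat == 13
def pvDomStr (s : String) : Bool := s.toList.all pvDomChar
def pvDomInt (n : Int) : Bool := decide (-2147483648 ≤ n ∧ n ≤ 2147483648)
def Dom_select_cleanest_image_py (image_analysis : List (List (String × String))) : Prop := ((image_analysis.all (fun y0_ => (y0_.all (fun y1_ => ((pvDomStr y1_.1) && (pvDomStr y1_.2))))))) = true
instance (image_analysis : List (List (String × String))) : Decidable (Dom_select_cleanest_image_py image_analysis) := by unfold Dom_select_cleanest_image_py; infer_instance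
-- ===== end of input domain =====

-- B replaces A's scored list + stable sort + take-first with a single running-minimum
-- pass (strict '<' keeps the first of tied minima): simpler, no intermediate list.

-- ===== PORT A =====
def pvTextIndicators : List String :=
  ["text", "logo", "label", "branding", "watermark", "lettering",
   "typography", "caption", "tagline", "slogan", "brand name"]

-- desc = (info.get('description') or '').lower()  (only '' is falsy among strings)
def pvDesc (info : List (String × String)) : String :=
  PySem.Str.lower (((PySem.Dict.mk info).get? "description").getD "")

-- penalty = sum(1 for kw in text_indicators if kw in desc)
def pvPenalty (info : List (String × String)) : Int :=
  pvTextIndicators.foldl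
    (fun s kw => if PySem.Str.isIn kw (pvDesc info) then s + 1 else s) 0

-- info['asset_id'] raises KeyError when absent: Pre_ excludes that, the default is never read
def pvAssetId (info : List (String × String)) : String :=
  ((PySem.Dict.mk info).get? "asset_id").getD ""

def select_cleanest_image_py (image_analysis : List (List (String × String))) : Option String :=
  if image_analysis = [] then none
  else
    let scored : List (Int × String) :=
      image_analysis.foldl (fun acc info => acc ++ [(pvPenalty info, pvAssetId info)]) []
    let sortedScored := PySem.List.sorted scored (fun x => x.1) false
    match sortedScored with
    | [] => none
    | x :: _ => some x.2

-- ===== PORT B =====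
def select_cleanest_image_py_alt (image_analysis : List (List (String × String))) : Option String :=
  if image_analysis = [] then none
  else
    let best : Option (Int × String) :=
      image_analysis.foldl
        (fun best info =>
          let penalty := pvPenalty info
          let assetId := pvAssetId info
          match best with
          | none => some (penalty, assetId)
          | some (bp, bi) => if penalty < bp then some (penalty, assetId) else some (bp, bi))
        none
    best.map (·.2)

-- ===== PRECONDITION & SPEC =====
-- Pre_: every dict has an 'asset_id' key — elsewhere both Pythons raise KeyError.
def Pre_select_cleanest_image_py (image_analysis : List (List (String × String))) : Prop :=
  ∀ info ∈ image_analysis, (PySem.Dict.mk info).contains "asset_id" = true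
instance (image_analysis : List (List (String × String))) : Decidable (Pre_select_cleanest_image_py image_analysis) := by unfold Pre_select_cleanest_image_py; infer_instance
def pvWitness_select_cleanest_image_py : (List (List (String × String))) :=
  [[("asset_id", "img1"), ("description", "clean product shot")],
   [("asset_id", "img2"), ("description", "logo with text")]]

def Spec_select_cleanest_image_py (image_analysis : List (List (String × String))) (out : Option String) : Prop := out = select_cleanest_image_py_alt image_analysis
instance (image_analysis : List (List (String × String))) (out : Option String) : Decidable (Spec_select_cleanest_image_py image_analysis out) := by unfold Spec_select_cleanest_image_py; infer_instance

-- ===== CLAIM (what is proved, stated in full; the proofs are below) =====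
def Claim_equal_select_cleanest_image_py : Prop := ∀ (image_analysis : List (List (String × String))), Dom_select_cleanest_image_py image_analysis → Pre_select_cleanest_image_py image_analysis → Spec_select_cleanest_image_py image_analysis (select_cleanest_image_py image_analysis)

-- ===== LEMMAS AND PROOFS =====

-- A's append-fold builds the map of the score function.
theorem pvScored_eq_map {α β : Type} (f : α → β) :
    ∀ (ia : List α) (init : List β),
      ia.foldl (fun acc info => acc ++ [f info]) init = init ++ ia.map f := by
  intro ia
  induction ia with
  | nil => intro init; simp
  | cons i rest ih => intro init; simp [List.foldl_cons, ih]

-- Head of the insertion-sort fold over a nonempty accumulator is the strict running minimum.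
theorem pvFoldl_insertBy_head (xs : List (Int × String)) :
    ∀ (a : Int × String) (t : List (Int × String)), ∃ t',
      xs.foldl (fun acc x => PySem.List.insertBy (fun p q => decide (p.1 < q.1)) x acc) (a :: t)
        = (xs.foldl (fun b y => if y.1 < b.1 then y else b) a) :: t' := by
  induction xs with
  | nil => intro a t; exact ⟨t, rfl⟩
  | cons y ys ih =>
    intro a t
    by_cases h : y.1 < a.1
    · simpa [List.foldl_cons, PySem.List.insertBy, h] using ih y (a :: t)
    · simpa [List.foldl_cons, PySem.List.insertBy, h] using
        ih a (PySem.List.insertBy (fun p q => decide (p.1 < q.1)) y t)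

-- Head of A's stable sort on a nonempty list = the strict running minimum.
theorem pvSorted_head (a : Int × String) (xs : List (Int × String)) :
    ∃ t', PySem.List.sorted (a :: xs) (fun x => x.1) false
      = (xs.foldl (fun b y => if y.1 < b.1 then y else b) a) :: t' := by
  rw [PySem.List.sorted_eq_foldl_insertBy]
  simpa [List.foldl_cons, PySem.List.insertBy] using pvFoldl_insertBy_head xs a []

-- B's Option fold, once seeded, is the strict running minimum of the scores.
theorem pvAltFold (ia : List (List (String × String))) :
    ∀ (b : Int × String),
      ia.foldl
        (fun best info =>
          let penalty := pvPenalty info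
          let assetId := pvAssetId info
          match best with
          | none => some (penalty, assetId)
          | some (bp, bi) => if penalty < bp then some (penalty, assetId) else some (bp, bi))
        (some b)
      = some ((ia.map (fun info => (pvPenalty info, pvAssetId info))).foldl
          (fun b y => if y.1 < b.1 then y else b) b) := by
  induction ia with
  | nil => intro b; rfl
  | cons i rest ih =>
    intro b
    by_cases h : pvPenalty i < b.1
    · simpa [List.foldl_cons, h] using ih (pvPenalty i, pvAssetId i)
    · simpa [List.foldl_cons, h] using ih b

-- ===== VERDICT (by name: the statement is the Claim_ definition above) =====
theorem select_cleanest_image_py_spec : Claim_equal_select_cleanest_image_py := by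
  intro ia _ _
  show select_cleanest_image_py ia = select_cleanest_image_py_alt ia
  cases ia with
  | nil => rfl
  | cons i rest =>
    unfold select_cleanest_image_py select_cleanest_image_py_alt
    simp only [List.foldl_cons, pvScored_eq_map, List.nil_append, List.singleton_append,
      reduceCtorEq, if_false]
    obtain ⟨t', ht⟩ := pvSorted_head (pvPenalty i, pvAssetId i)
      (rest.map (fun info => (pvPenalty info, pvAssetId info)))
    rw [ht, pvAltFold]
    rfl
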